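-- pv_equiv track=rewrite | github.com/Rikul/my_mcp_servers | sqlite_read_server/src/sqlite_read_server/server.py | _strip_string_literals
-- ===== SOURCE A (Python) =====
-- def _strip_string_literals(query: str) -> str:
--     """Return the query with contents of quoted string literals removed."""
--
--     result: list[str] = []
--     i = 0
--     in_single = False
--     in_double = False
--     length = len(query)
--
--     while i < length:
--         char = query[i]
--
--         if in_single:
--             if char == "'":
--                 # SQLite escapes single quotes with a doubled quote.
--                 if i + 1 < length and query[i + 1] == "'":
--                     i += 2
--                     continue
--                 in_single = False
--             i += 1
--             continue
--
--         if in_double: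
--             if char == '"':
--                 if i + 1 < length and query[i + 1] == '"':
--                     i += 2
--                     continue
--                 in_double = False
--             i += 1
--             continue
--
--         if char == "'":
--             in_single = True
--             i += 1
--             continue
--
--         if char == '"':
--             in_double = True
--             i += 1
--             continue
--
--         result.append(char)
--         i += 1
--
--     return "".join(result)
-- ===== SOURCE B (Python) =====
-- import re
--
-- # Each quoted literal (single- or double-quoted, '' / "" escaping, optionally
-- # unterminated) is matched as a whole and deleted.
-- _LITERAL = re.compile(r"'(?:[^']|'')*'?|\"(?:[^\"]|\"\")*\"?")
--
--
-- def _strip_string_literals(query: str) -> str: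
--     return _LITERAL.sub("", query)
-- ===== Notes on version B (the rewrite author's own statement) =====
-- stated objective: faster
-- what changed: Replaces the hand-written index loop with in_single/in_double state flags by a single compiled regex that matches each quoted literal (with doubled-quote escaping, optionally unterminated) as a whole and substitutes the empty string.
import Mathlib
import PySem

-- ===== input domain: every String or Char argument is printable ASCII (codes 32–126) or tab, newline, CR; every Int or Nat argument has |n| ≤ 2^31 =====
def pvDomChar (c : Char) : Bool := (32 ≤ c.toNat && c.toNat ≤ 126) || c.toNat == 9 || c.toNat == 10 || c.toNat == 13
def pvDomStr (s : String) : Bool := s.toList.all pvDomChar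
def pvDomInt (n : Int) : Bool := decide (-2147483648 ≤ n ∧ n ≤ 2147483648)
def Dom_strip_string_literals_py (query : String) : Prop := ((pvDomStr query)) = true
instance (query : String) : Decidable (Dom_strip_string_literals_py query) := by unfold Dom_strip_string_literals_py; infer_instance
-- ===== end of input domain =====

-- B replaces A's manual index loop with state flags by a regex deleting each quoted literal whole (idiomatic, same behaviour).

-- ===== PORT A =====
-- A's while-loop over index i with flags in_single/in_double, transcribed as
-- recursion over the character list; A's lookahead query[i+1] is the second
-- element of the remaining list. Branches in A's order: in_single, in_double,
-- opening ', opening ", ordinary char appended.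
def pvGoA : List Char → Bool → Bool → List Char
  | [], _, _ => []
  | [c], true, ind => if c = '\'' then pvGoA [] false ind else pvGoA [] true ind
  | c :: c' :: rest, true, ind =>
      if c = '\'' then
        if c' = '\'' then pvGoA rest true ind        -- doubled quote: i += 2
        else pvGoA (c' :: rest) false ind            -- close, i += 1
      else pvGoA (c' :: rest) true ind
  | [c], false, true => if c = '"' then pvGoA [] false false else pvGoA [] false true
  | c :: c' :: rest, false, true =>
      if c = '"' then
        if c' = '"' then pvGoA rest false true
        else pvGoA (c' :: rest) false false
      else pvGoA (c' :: rest) false true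
  | c :: rest, false, false =>
      if c = '\'' then pvGoA rest true false
      else if c = '"' then pvGoA rest false true
      else c :: pvGoA rest false false

def strip_string_literals_py (query : String) : String :=
  String.ofList (pvGoA query.toList false false)

-- ===== PORT B =====
-- Hand-written transcription of the regex `'(?:[^']|'')*'?|"(?:[^"]|"")*"?`:
-- at each position a quote starts a whole-literal match consumed by pvSkipLit
-- (doubled quotes stay inside; an unterminated literal runs to end of string),
-- any other character is copied.
def pvSkipLit (q : Char) : List Char → List Char
  | [] => []
  | [c] => if c = q then [] else []
  | c :: c' :: rest =>
      if c = q then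
        if c' = q then pvSkipLit q rest else c' :: rest
      else pvSkipLit q (c' :: rest)

theorem pvSkipLit_length_le (q : Char) (l : List Char) :
    (pvSkipLit q l).length ≤ l.length := by
  induction l using pvSkipLit.induct q <;> simp_all [pvSkipLit] <;> omega

def pvGoB : List Char → List Char
  | [] => []
  | c :: rest =>
      if c = '\'' then pvGoB (pvSkipLit '\'' rest)
      else if c = '"' then pvGoB (pvSkipLit '"' rest)
      else c :: pvGoB rest
termination_by l => l.length
decreasing_by
  · exact Nat.lt_succ_of_le (pvSkipLit_length_le _ _)
  · exact Nat.lt_succ_of_le (pvSkipLit_length_le _ _)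
  · simp

def strip_string_literals_py_alt (query : String) : String :=
  String.ofList (pvGoB query.toList)

-- ===== PRECONDITION & SPEC =====
def Spec_strip_string_literals_py (query : String) (out : String) : Prop := out = strip_string_literals_py_alt query
instance (query : String) (out : String) : Decidable (Spec_strip_string_literals_py query out) := by unfold Spec_strip_string_literals_py; infer_instance

-- ===== CLAIM (what is proved, stated in full; the proofs are below) =====
def Claim_equal_strip_string_literals_py : Prop := ∀ (query : String), Dom_strip_string_literals_py query → Spec_strip_string_literals_py query (strip_string_literals_py query)

-- ===== LEMMAS AND PROOFS =====

-- Inside a single-quoted literal, A's loop consumes exactly the characters the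
-- regex literal-skipper consumes, and resumes outside.
theorem pvGoA_single (l : List Char) :
    pvGoA l true false = pvGoA (pvSkipLit '\'' l) false false := by
  induction l using pvSkipLit.induct '\'' <;> simp_all [pvSkipLit, pvGoA]

theorem pvGoA_double (l : List Char) :
    pvGoA l false true = pvGoA (pvSkipLit '"' l) false false := by
  induction l using pvSkipLit.induct '"' <;> simp_all [pvSkipLit, pvGoA]

theorem pvGoA_eq_pvGoB (l : List Char) : pvGoA l false false = pvGoB l := by
  induction l using pvGoB.induct with
  | case1 => simp [pvGoA, pvGoB]
  | case2 rest ih =>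
      calc pvGoA ('\'' :: rest) false false = pvGoA rest true false := by simp [pvGoA]
        _ = pvGoA (pvSkipLit '\'' rest) false false := pvGoA_single rest
        _ = pvGoB (pvSkipLit '\'' rest) := ih
        _ = pvGoB ('\'' :: rest) := by rw [pvGoB]; simp
  | case3 rest h ih =>
      calc pvGoA ('"' :: rest) false false = pvGoA rest false true := by simp [pvGoA]
        _ = pvGoA (pvSkipLit '"' rest) false false := pvGoA_double rest
        _ = pvGoB (pvSkipLit '"' rest) := ih
        _ = pvGoB ('"' :: rest) := by rw [pvGoB]; simp
  | case4 c rest h h2 ih =>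
      rw [pvGoB]
      simp only [if_neg h, if_neg h2]
      rw [← ih, pvGoA, if_neg h, if_neg h2]

-- ===== VERDICT (by name: the statement is the Claim_ definition above) =====
theorem strip_string_literals_py_spec : Claim_equal_strip_string_literals_py := by
  intro query _
  unfold Spec_strip_string_literals_py strip_string_literals_py strip_string_literals_py_alt
  rw [pvGoA_eq_pvGoB]
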